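-- pv_equiv track=rewrite | github.com/MAmirEshraghi/spot-perception-stack | src/vision_grounding/deduplicate_objects_by_label_individual.py | create_obj_to_object_id_mapping
-- ===== SOURCE A (Python) =====
-- from collections import defaultdict
-- from typing import Dict, List, Tuple, Optional
--
-- def create_obj_to_object_id_mapping(objects: List[Dict]) -> Dict[int, str]:
--     """
--     Create mapping from object index in list to sanitized object_id.
--     Uses the same logic as when building object_id_to_obj.
--     """
--     per_frame_counts = defaultdict(int)
--     obj_to_object_id = {}
--
--     for idx, obj in enumerate(objects):
--         frame_meta = obj.get("frame_metadata", {})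
--         frame_id = frame_meta.get("frame_id")
--
--         if frame_id is None:
--             continue
--
--         local_idx = per_frame_counts[frame_id]
--         per_frame_counts[frame_id] += 1
--
--         full_object_id = f"{frame_id}_bbox_object_{local_idx}"
--         sanitized_object_id = (
--             full_object_id
--             .replace('/', '_')
--             .replace(':', '_')
--             .replace('\\', '_')
--         )
--
--         obj_to_object_id[idx] = sanitized_object_id
--
--     return obj_to_object_id
-- ===== SOURCE B (Python) =====
-- def create_obj_to_object_id_mapping(objects):
--     """Group-then-enumerate: pass 1 builds an index table frame_id -> list of object
--     indices; pass 2 enumerates each frame's index list to assign local ids; the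
--     mapping is then emitted in ascending object-index order."""
--     groups = {}
--     for idx, obj in enumerate(objects):
--         frame_id = obj.get("frame_metadata", {}).get("frame_id")
--         if frame_id is not None:
--             groups.setdefault(frame_id, []).append(idx)
--     ids = {}
--     for frame_id, idxs in groups.items():
--         for local_idx, idx in enumerate(idxs):
--             ids[idx] = (f"{frame_id}_bbox_object_{local_idx}"
--                         .replace('/', '_').replace(':', '_').replace('\\', '_'))
--     return dict(sorted(ids.items(), key=lambda item: item[0]))
-- ===== Notes on version B (the rewrite author's own statement) =====
-- stated objective: alternative
-- what changed: Replaced A's single stateful pass with running per-frame counters by a staged group-then-enumerate structure: one pass builds an index table frame_id -> list of object indices, a second pass enumerates each group to assign local ids, and the result is emitted sorted by object index.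
import Mathlib
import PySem

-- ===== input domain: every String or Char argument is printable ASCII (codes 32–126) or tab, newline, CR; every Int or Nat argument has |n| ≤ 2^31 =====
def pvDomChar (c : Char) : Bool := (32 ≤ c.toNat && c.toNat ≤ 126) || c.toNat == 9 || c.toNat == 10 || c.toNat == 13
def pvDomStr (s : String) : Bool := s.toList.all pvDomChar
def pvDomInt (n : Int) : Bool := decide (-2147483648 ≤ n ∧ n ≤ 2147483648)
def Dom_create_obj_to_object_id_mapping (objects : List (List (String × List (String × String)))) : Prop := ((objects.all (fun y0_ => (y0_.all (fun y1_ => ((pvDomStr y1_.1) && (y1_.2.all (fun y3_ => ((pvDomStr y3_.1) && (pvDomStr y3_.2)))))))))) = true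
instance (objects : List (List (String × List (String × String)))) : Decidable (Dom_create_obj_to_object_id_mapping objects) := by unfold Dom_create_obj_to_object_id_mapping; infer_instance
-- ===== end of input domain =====

-- B replaces A's single stateful pass with running per-frame counters by a staged
-- group-then-enumerate structure (index table per frame, then per-group enumeration,
-- emitted sorted by object index); objective: alternative (no speed claim).

-- shared by both ports: the two .get lookups and the f-string + three .replace sanitizations
def pvFidOf (obj : List (String × List (String × String))) : Option String :=
  (PySem.Dict.mk (((PySem.Dict.mk obj).get? "frame_metadata").getD [])).get? "frame_id"

def pvMkId (fid : String) (k : Int) : String :=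
  PySem.Str.replace (PySem.Str.replace (PySem.Str.replace
    (String.ofList (fid.toList ++ "_bbox_object_".toList ++ (PySem.Int.toStr k).toList))
    "/" "_") ":" "_") "\\" "_"

-- ===== PORT A =====
def pvAStep (st : PySem.Dict String Int × PySem.Dict Int String)
    (p : Int × List (String × List (String × String))) :
    PySem.Dict String Int × PySem.Dict Int String :=
  match pvFidOf p.2 with
  | none => st
  | some fid =>
    let localIdx := st.1.getD fid 0
    (st.1.insert fid (localIdx + 1), st.2.insert p.1 (pvMkId fid localIdx))

def create_obj_to_object_id_mapping (objects : List (List (String × List (String × String)))) : List (Int × String) :=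
  ((PySem.List.enumerate objects 0).foldl pvAStep (PySem.Dict.empty, PySem.Dict.empty)).2.items

-- ===== PORT B =====
-- pass 1 step: groups.setdefault(frame_id, []).append(idx)
def pvBGroupStep (g : PySem.Dict String (List Int))
    (p : Int × List (String × List (String × String))) : PySem.Dict String (List Int) :=
  match pvFidOf p.2 with
  | none => g
  | some fid => g.modify fid [] (fun l => l ++ [p.1])

def create_obj_to_object_id_mapping_alt (objects : List (List (String × List (String × String)))) : List (Int × String) :=
  let groups := (PySem.List.enumerate objects 0).foldl pvBGroupStep PySem.Dict.empty
  let ids := groups.items.foldl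
    (fun (acc : PySem.Dict Int String) q =>
      (PySem.List.enumerate q.2 0).foldl (fun a r => a.insert r.2 (pvMkId q.1 r.1)) acc)
    PySem.Dict.empty
  (PySem.Dict.ofList (PySem.List.sorted ids.items (fun item => item.1))).items

-- ===== PRECONDITION & SPEC =====
def Spec_create_obj_to_object_id_mapping (objects : List (List (String × List (String × String)))) (out : List (Int × String)) : Prop := out = create_obj_to_object_id_mapping_alt objects
instance (objects : List (List (String × List (String × String)))) (out : List (Int × String)) : Decidable (Spec_create_obj_to_object_id_mapping objects out) := by unfold Spec_create_obj_to_object_id_mapping; infer_instance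

-- ===== CLAIM (what is proved, stated in full; the proofs are below) =====
def Claim_equal_create_obj_to_object_id_mapping : Prop := ∀ (objects : List (List (String × List (String × String)))), Dom_create_obj_to_object_id_mapping objects → Spec_create_obj_to_object_id_mapping objects (create_obj_to_object_id_mapping objects)

-- ===== LEMMAS AND PROOFS =====

-- reference spine both ports are related to: pre = frame ids already consumed
def pvSpine (pre rest : List (Option String)) : List (Int × String) :=
  match rest with
  | [] => []
  | none :: rest' => pvSpine (pre ++ [none]) rest'
  | some f :: rest' =>
      ((pre.length : Int), pvMkId f (pre.count (some f) : Int)) :: pvSpine (pre ++ [some f]) rest'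

-- (frame_id, index) pairs of the non-None entries, indices starting at s
def pvPairsFrom (fids : List (Option String)) (s : Int) : List (String × Int) :=
  (PySem.List.enumerate fids s).filterMap (fun p => p.2.map (fun f => (f, p.1)))

-- pure form of B's pass-1 fold
def pvGrp (l : List (String × Int)) (d : PySem.Dict String (List Int)) : PySem.Dict String (List Int) :=
  l.foldl (fun d p => d.modify p.1 [] (fun x => x ++ [p.2])) d

-- the (idx, object_id) pairs one frame group contributes
def pvEmap (f : String) (idxs : List Int) : List (Int × String) :=
  (PySem.List.enumerate idxs 0).map (fun r => (r.2, pvMkId f r.1))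

def pvFlat (items : List (String × List Int)) : List (Int × String) :=
  items.flatMap (fun q => pvEmap q.1 q.2)

lemma a_spine (objs : List (List (String × List (String × String)))) :
    ∀ (pre : List (Option String)) (c : PySem.Dict String Int) (out : PySem.Dict Int String),
    (∀ f : String, c.getD f 0 = (pre.count (some f) : Int)) →
    (∀ k : Int, out.contains k = true → k < (pre.length : Int)) →
    ((PySem.List.enumerate objs (pre.length : Int)).foldl pvAStep (c, out)).2.items
      = out.items ++ pvSpine pre (objs.map pvFidOf) := by
  induction objs with
  | nil => intro pre c out _ _; simp [pvSpine]
  | cons o objs' ih =>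
    intro pre c out hc hout
    rw [List.map_cons, PySem.List.enumerate_cons, List.foldl_cons]
    cases hfid : pvFidOf o with
    | none =>
      have hstep : pvAStep (c, out) ((pre.length : Int), o) = (c, out) := by
        simp [pvAStep, hfid]
      have hlen : ((pre.length : Int) + 1) = (((pre ++ [(none : Option String)]).length : Nat) : Int) := by simp
      have hc' : ∀ f : String, c.getD f 0 = ((pre ++ [(none : Option String)]).count (some f) : Int) := by
        intro f; rw [hc f]; simp
      have hout' : ∀ k : Int, out.contains k = true → k < (((pre ++ [(none : Option String)]).length : Nat) : Int) := by
        intro k hk; have := hout k hk; simp; omega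
      rw [hstep, hlen, ih (pre ++ [none]) c out hc' hout']
      simp [pvSpine]
    | some fid =>
      have hstep : pvAStep (c, out) ((pre.length : Int), o)
          = (c.insert fid (c.getD fid 0 + 1),
             out.insert ((pre.length : Nat) : Int) (pvMkId fid (c.getD fid 0))) := by
        simp [pvAStep, hfid]
      have hlen : ((pre.length : Int) + 1) = (((pre ++ [some fid]).length : Nat) : Int) := by simp
      have hc' : ∀ g : String, (c.insert fid (c.getD fid 0 + 1)).getD g 0
          = ((pre ++ [some fid]).count (some g) : Int) := by
        intro g
        by_cases hg : g = fid
        · subst hg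
          rw [PySem.Dict.getD_insert_self, hc g]
          simp [List.count_append]
        · rw [PySem.Dict.getD_insert_of_ne _ _ _ hg, hc g]
          have hne : (some g : Option String) ≠ some fid := by simp [hg]
          simp [List.count_append, Ne.symm hne]
      have hout' : ∀ k : Int, (out.insert ((pre.length : Nat) : Int) (pvMkId fid (c.getD fid 0))).contains k = true
          → k < (((pre ++ [some fid]).length : Nat) : Int) := by
        intro k hk
        rw [PySem.Dict.contains_insert] at hk
        simp at hk ⊢
        rcases hk with hk | hk
        · omega
        · have := hout k hk; omega
      rw [hstep, hlen, ih (pre ++ [some fid]) _ _ hc' hout']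
      have hnc : out.contains ((pre.length : Nat) : Int) = false := by
        cases h : out.contains ((pre.length : Nat) : Int) with
        | false => rfl
        | true => exact absurd (hout _ h) (by omega)
      rw [PySem.Dict.items_insert_of_not_contains _ _ hnc, hc fid]
      simp [pvSpine]

-- B's pass-1 fold over objects equals the pure modify-fold over the (fid, idx) pairs
lemma bfold_pairs (objs : List (List (String × List (String × String)))) :
    ∀ (s : Int) (g : PySem.Dict String (List Int)),
    (PySem.List.enumerate objs s).foldl pvBGroupStep g
      = pvGrp (pvPairsFrom (objs.map pvFidOf) s) g := by
  induction objs with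
  | nil => intro s g; simp [pvPairsFrom, pvGrp, PySem.List.enumerate_nil]
  | cons o objs' ih =>
    intro s g
    rw [List.map_cons, PySem.List.enumerate_cons, List.foldl_cons]
    unfold pvPairsFrom
    rw [PySem.List.enumerate_cons, List.filterMap_cons]
    cases hfid : pvFidOf o with
    | none =>
      have : pvBGroupStep g (s, o) = g := by simp [pvBGroupStep, hfid]
      rw [this, ih]; rfl
    | some fid =>
      have : pvBGroupStep g (s, o) = g.modify fid [] (fun l => l ++ [s]) := by
        simp [pvBGroupStep, hfid]
      rw [this, ih]
      simp only [pvGrp, pvPairsFrom, Option.map_some, List.filterMap_cons, List.foldl_cons]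

-- B's nested pass-2 fold equals a single insert-fold over the flattened pair list
lemma ids_fold_flat (items : List (String × List Int)) :
    ∀ (acc : PySem.Dict Int String),
    items.foldl
      (fun (acc : PySem.Dict Int String) q =>
        (PySem.List.enumerate q.2 0).foldl (fun a r => a.insert r.2 (pvMkId q.1 r.1)) acc)
      acc
    = (pvFlat items).foldl (fun a r => a.insert r.1 r.2) acc := by
  induction items with
  | nil => intro acc; simp [pvFlat]
  | cons q items' ih =>
    intro acc
    rw [List.foldl_cons]
    have hinner :
        (PySem.List.enumerate q.2 0).foldl (fun a r => a.insert r.2 (pvMkId q.1 r.1)) acc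
        = (pvEmap q.1 q.2).foldl (fun a r => a.insert r.1 r.2) acc := by
      simp [pvEmap, List.foldl_map]
    rw [hinner, ih]
    simp [pvFlat, List.foldl_append]

-- pairs lemmas
lemma pairs_append (fids : List (Option String)) (o : Option String) (s : Int) :
    pvPairsFrom (fids ++ [o]) s
      = pvPairsFrom fids s ++ (match o with | none => [] | some f => [(f, s + (fids.length : Int))]) := by
  unfold pvPairsFrom
  rw [PySem.List.enumerate_append, List.filterMap_append]
  cases o <;> simp [PySem.List.enumerate_cons, PySem.List.enumerate_nil]

lemma pairs_filter_count (fids : List (Option String)) (f : String) :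
    ∀ s : Int, ((pvPairsFrom fids s).filter (fun p => p.1 == f)).length = fids.count (some f) := by
  induction fids with
  | nil => intro s; simp [pvPairsFrom, PySem.List.enumerate_nil]
  | cons o fids' ih =>
    intro s
    unfold pvPairsFrom
    rw [PySem.List.enumerate_cons, List.filterMap_cons]
    cases o with
    | none =>
      have := ih (s + 1)
      unfold pvPairsFrom at this
      simp only [Option.map_none] at *
      rw [this]
      simp [List.count_cons]
    | some g =>
      have := ih (s + 1)
      unfold pvPairsFrom at this
      simp only [Option.map_some, List.filter_cons] at *
      by_cases hg : g = f
      · subst hg; simp [this, List.count_cons]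
      · have h1 : ((g, s).1 == f) = false := by simp [hg]
        simp only [h1, Bool.false_eq_true, if_false, this]
        have : (some g == some f) = false := by simp [hg]
        simp [List.count_cons, hg]

-- spine lemmas
lemma spine_append_none (rest : List (Option String)) :
    ∀ pre, pvSpine pre (rest ++ [none]) = pvSpine pre rest := by
  induction rest with
  | nil => intro pre; simp [pvSpine]
  | cons o rest' ih => intro pre; cases o <;> simp [pvSpine, ih]

lemma spine_append_some (rest : List (Option String)) (f : String) :
    ∀ pre, pvSpine pre (rest ++ [some f])
      = pvSpine pre rest ++ [(((pre ++ rest).length : Int), pvMkId f (((pre ++ rest).count (some f) : Nat) : Int))] := by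
  induction rest with
  | nil => intro pre; simp [pvSpine]
  | cons o rest' ih =>
    intro pre
    cases o with
    | none =>
      simp only [List.cons_append, pvSpine, ih (pre ++ [none])]
      simp
    | some g =>
      simp only [List.cons_append, pvSpine, ih (pre ++ [some g])]
      simp

lemma spine_key_lb (rest : List (Option String)) :
    ∀ pre p, p ∈ pvSpine pre rest → (pre.length : Int) ≤ p.1 := by
  induction rest with
  | nil => intro pre p h; simp [pvSpine] at h
  | cons o rest' ih =>
    intro pre p h
    cases o with
    | none =>
      have := ih (pre ++ [none]) p (by simpa [pvSpine] using h)
      simp at this; omega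
    | some g =>
      simp only [pvSpine, List.mem_cons] at h
      rcases h with h | h
      · subst h; simp
      · have := ih (pre ++ [some g]) p h
        simp at this; omega

lemma spine_pairwise (rest : List (Option String)) :
    ∀ pre, List.Pairwise (fun a b => a.1 < b.1) (pvSpine pre rest) := by
  induction rest with
  | nil => intro pre; simp [pvSpine]
  | cons o rest' ih =>
    intro pre
    cases o with
    | none => simpa [pvSpine] using ih (pre ++ [none])
    | some g =>
      simp only [pvSpine]
      refine List.Pairwise.cons ?_ (ih (pre ++ [some g]))
      intro b hb
      have := spine_key_lb rest' (pre ++ [some g]) b hb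
      simp at this ⊢; omega

-- pvEmap on an appended index
lemma emap_append (f : String) (v : List Int) (n : Int) :
    pvEmap f (v ++ [n]) = pvEmap f v ++ [(n, pvMkId f (v.length : Int))] := by
  unfold pvEmap
  rw [PySem.List.enumerate_append]
  simp [PySem.List.enumerate_cons, PySem.List.enumerate_nil]

-- the flatten of a modified group dict, as a permutation
lemma flat_modify (d : PySem.Dict String (List Int)) (f : String) (n : Int)
    (hnd : d.keys.Nodup) :
    (pvFlat ((d.modify f [] (fun l => l ++ [n])).items)).Perm
      (pvFlat d.items ++ [(n, pvMkId f ((d.getD f []).length : Int))]) := by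
  rw [PySem.Dict.modify]
  by_cases hc : d.contains f = true
  · -- f already grouped: its entry is replaced in place
    obtain ⟨v, hv⟩ : ∃ v, d.get? f = some v := by
      have h := PySem.Dict.contains_eq_isSome_get? d f
      rw [hc] at h
      exact Option.isSome_iff_exists.mp h.symm
    have hmem : (f, v) ∈ d.items := (PySem.Dict.get?_eq_some_iff_mem_items d f v hnd).mp hv
    obtain ⟨l1, l2, hsplit⟩ := List.append_of_mem hmem
    have hgetD : d.getD f [] = v := PySem.Dict.getD_of_mem_items d hmem hnd []
    have hnd' : (List.map Prod.fst (l1 ++ (f, v) :: l2)).Nodup := by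
      have : d.keys = List.map Prod.fst (l1 ++ (f, v) :: l2) := by
        rw [PySem.Dict.keys, hsplit]
      rwa [this] at hnd
    rw [List.map_append, List.map_cons, List.nodup_append] at hnd'
    have hf1 : ∀ p ∈ l1, p.1 ≠ f := by
      intro p hp hpf
      exact hnd'.2.2 p.1 (List.mem_map_of_mem hp) (f, v).1 (by simp) (by simp [hpf])
    have hf2 : ∀ p ∈ l2, p.1 ≠ f := by
      intro p hp hpf
      have : p.1 ∈ List.map Prod.fst l2 := List.mem_map_of_mem (f := Prod.fst) hp
      rw [hpf] at this
      exact (List.nodup_cons.mp hnd'.2.1).1 this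
    have hitems : (d.insert f ((d.getD f []) ++ [n])).items
        = l1 ++ (f, v ++ [n]) :: l2 := by
      rw [PySem.Dict.insert]
      simp only [hc, if_true, hsplit, hgetD]
      rw [List.map_append, List.map_cons]
      congr 1
      · rw [List.map_congr_left (g := id) (fun p hp => by simp [hf1 p hp]), List.map_id]
      · congr 1
        · simp
        · rw [List.map_congr_left (g := id) (fun p hp => by simp [hf2 p hp]), List.map_id]
    rw [hitems, hgetD]
    simp only [pvFlat, List.flatMap_append, List.flatMap_cons]
    rw [hsplit]
    simp only [List.flatMap_append, List.flatMap_cons]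
    have he := emap_append f v n
    simp only [he]
    -- (a ++ ((ev ++ [x]) ++ b)) ~ ((a ++ (ev ++ b)) ++ [x])
    rw [List.perm_iff_count]
    intro a
    simp [List.count_append, List.count_cons]
  · -- new frame id: appended at the end
    have hc' : d.contains f = false := by simpa using hc
    have hgetD : d.getD f [] = [] := PySem.Dict.getD_of_not_contains d [] hc'
    have hitems : (d.insert f ((d.getD f []) ++ [n])).items = d.items ++ [(f, [n])] := by
      rw [PySem.Dict.insert]
      simp [hc', hgetD]
    rw [hitems, hgetD]
    simp only [pvFlat, List.flatMap_append, List.flatMap_cons, List.flatMap_nil]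
    have : pvEmap f [n] = [(n, pvMkId f 0)] := by
      simp [pvEmap, PySem.List.enumerate_cons, PySem.List.enumerate_nil]
    simp [this]

-- nodup keys of the group dict (instance of nodup_keys_foldl_modify_key)
lemma grp_nodup (l : List (String × Int)) :
    (pvGrp l PySem.Dict.empty).keys.Nodup := by
  have := PySem.Dict.nodup_keys_foldl_modify_key l (fun p => p.1) ([] : List Int)
    (fun _ p => fun x => x ++ [p.2]) PySem.Dict.empty PySem.Dict.nodup_keys_empty
  simpa [pvGrp] using this

-- main permutation: B's flattened groups are a permutation of A's spine
lemma main_perm (fids : List (Option String)) :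
    (pvSpine [] fids).Perm (pvFlat (pvGrp (pvPairsFrom fids 0) PySem.Dict.empty).items) := by
  induction fids using List.reverseRecOn with
  | nil => simp [pvSpine, pvPairsFrom, PySem.List.enumerate_nil, pvGrp, pvFlat, PySem.Dict.empty]
  | append_singleton fids o ih =>
    cases o with
    | none =>
      rw [spine_append_none, pairs_append]
      simpa using ih
    | some f =>
      rw [spine_append_some, pairs_append]
      simp only []
      have hG : pvGrp (pvPairsFrom fids 0 ++ [(f, 0 + (fids.length : Int))]) PySem.Dict.empty
          = (pvGrp (pvPairsFrom fids 0) PySem.Dict.empty).modify f [] (fun l => l ++ [0 + (fids.length : Int)]) := by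
        simp [pvGrp, List.foldl_append]
      rw [hG]
      have hlen : ((pvGrp (pvPairsFrom fids 0) PySem.Dict.empty).getD f []).length
          = fids.count (some f) := by
        have h1 := PySem.Dict.getD_foldl_modify_append (pvPairsFrom fids 0) PySem.Dict.empty f
        have h2 : pvGrp (pvPairsFrom fids 0) PySem.Dict.empty
            = List.foldl (fun d p => d.modify p.fst [] fun x => x ++ [p.snd]) PySem.Dict.empty (pvPairsFrom fids 0) := rfl
        rw [h2, h1]
        simp [PySem.Dict.getD_empty, pairs_filter_count fids f 0]
      have hperm := flat_modify (pvGrp (pvPairsFrom fids 0) PySem.Dict.empty) f (0 + (fids.length : Int))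
        (grp_nodup _)
      rw [hlen] at hperm
      refine List.Perm.trans ?_ hperm.symm
      have : (0 + (fids.length : Int)) = (fids.length : Int) := by omega
      rw [this]
      simpa using (List.Perm.append ih (List.Perm.refl _)).symm.symm

-- spine keys are strictly increasing, hence nodup
lemma spine_keys_nodup (fids : List (Option String)) :
    (List.map Prod.fst (pvSpine [] fids)).Nodup := by
  have h : List.Pairwise (fun a b : (Int × String) => Prod.fst a ≠ Prod.fst b) (pvSpine [] fids) :=
    (spine_pairwise fids []).imp (fun hlt => ne_of_lt hlt)
  exact List.pairwise_map.mpr h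

-- ===== VERDICT (by name: the statement is the Claim_ definition above) =====
theorem create_obj_to_object_id_mapping_spec : Claim_equal_create_obj_to_object_id_mapping := by
  unfold Claim_equal_create_obj_to_object_id_mapping
  intro objects _
  unfold Spec_create_obj_to_object_id_mapping
  have hA : create_obj_to_object_id_mapping objects = pvSpine [] (objects.map pvFidOf) := by
    unfold create_obj_to_object_id_mapping
    have h0 : (0 : Int) = ((([] : List (Option String)).length : Nat) : Int) := by simp
    rw [h0, a_spine objects [] PySem.Dict.empty PySem.Dict.empty
        (by intro f; simp [PySem.Dict.getD_empty])
        (by intro k hk; rw [PySem.Dict.contains_empty] at hk; exact absurd hk (by simp))]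
    simp [PySem.Dict.empty]
  set fids := objects.map pvFidOf with hfids
  have hperm := main_perm fids
  have hflat_keys_nodup :
      ((pvFlat (pvGrp (pvPairsFrom fids 0) PySem.Dict.empty).items).map Prod.fst).Nodup :=
    (hperm.map Prod.fst).nodup (spine_keys_nodup fids)
  have hB : create_obj_to_object_id_mapping_alt objects = pvSpine [] fids := by
    simp only [create_obj_to_object_id_mapping_alt]
    rw [bfold_pairs objects 0 PySem.Dict.empty, ← hfids, ids_fold_flat]
    set flat := pvFlat (pvGrp (pvPairsFrom fids 0) PySem.Dict.empty).items with hflat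
    have hids : (flat.foldl (fun (a : PySem.Dict Int String) r => a.insert r.1 r.2) PySem.Dict.empty).items = flat := by
      have := PySem.Dict.items_foldl_insert_fresh flat Prod.fst Prod.snd PySem.Dict.empty
        (fun a _ => PySem.Dict.contains_empty _) hflat_keys_nodup
      simpa [PySem.Dict.empty] using this
    rw [hids]
    have hsorted : PySem.List.sorted flat (fun item => item.1) = pvSpine [] fids :=
      PySem.List.sorted_eq_of_perm_of_pairwise_lt flat (pvSpine [] fids) (fun item => item.1)
        hperm (spine_pairwise fids [])
    rw [hsorted]
    -- dict() of an assoc list with nodup keys keeps it unchanged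
    rw [PySem.Dict.ofList, PySem.Dict.update]
    have := PySem.Dict.items_foldl_insert_fresh (pvSpine [] fids) Prod.fst Prod.snd PySem.Dict.empty
      (fun a _ => PySem.Dict.contains_empty _) (spine_keys_nodup fids)
    simpa [PySem.Dict.empty] using this
  rw [hA, hB]
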